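-- pv_equiv track=rewrite | github.com/blackbriarmead-1/blockspy | src/BlockSpy/main.py | getDiffsToTraverse
-- ===== SOURCE A (Python) =====
-- def getMSB(n):
--     n |= n>>1
--     n |= n>>2
--     n |= n>>4
--     n |= n>>8
--     n |= n>>16
--     n = n + 1
--
--     # Return original MSB after shifting.
--     # n now becomes 100000000
--     return (n >> 1)
--
-- def getDiffsToTraverse(index):
--     tempindex = index
--     previndex = 0
--     output = []
--     while(tempindex > 0):
--         msb = getMSB(tempindex)
--         target = previndex + msb
--         output.append((previndex, target))
--         previndex = target
--         tempindex -= msb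
--     return(output)
-- ===== SOURCE B (Python) =====
-- def getDiffsToTraverse(index):
--     if index <= 0:
--         return []
--     out = [(2 * a, 2 * b) for (a, b) in getDiffsToTraverse(index // 2)]
--     if index % 2:
--         out.append((index - 1, index))
--     return out
-- ===== Notes on version B (the rewrite author's own statement) =====
-- stated objective: simpler
-- what changed: Replaces the getMSB bit-smearing helper and the subtract-the-MSB while loop by a short recursion on index//2: the segments of index are the segments of index//2 with both endpoints doubled, plus a final (index-1, index) segment when index is odd.
import Mathlib
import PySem

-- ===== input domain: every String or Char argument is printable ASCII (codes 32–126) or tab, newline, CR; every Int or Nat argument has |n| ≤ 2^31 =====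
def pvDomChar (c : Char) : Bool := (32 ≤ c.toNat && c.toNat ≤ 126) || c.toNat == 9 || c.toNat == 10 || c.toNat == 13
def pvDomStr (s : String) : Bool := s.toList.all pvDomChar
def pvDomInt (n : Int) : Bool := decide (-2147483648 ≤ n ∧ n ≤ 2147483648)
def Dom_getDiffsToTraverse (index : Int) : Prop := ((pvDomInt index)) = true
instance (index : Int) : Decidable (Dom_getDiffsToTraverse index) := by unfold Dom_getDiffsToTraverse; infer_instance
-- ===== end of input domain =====

-- B replaces A's getMSB bit-smearing helper and subtract-the-MSB while loop by a short
-- recursion on index // 2 that doubles the endpoints of the sub-result (objective: simpler).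

-- ===== PORT A =====
-- Python's `>>` and `|` on int are arithmetic shift and two's-complement or; `Int.shiftRight`
-- (floor shift, also on negatives) and `Int.lor` are exact counterparts.
def getMSB (n : Int) : Int :=
  let n := Int.lor n (Int.shiftRight n 1)
  let n := Int.lor n (Int.shiftRight n 2)
  let n := Int.lor n (Int.shiftRight n 4)
  let n := Int.lor n (Int.shiftRight n 8)
  let n := Int.lor n (Int.shiftRight n 16)
  let n := n + 1
  Int.shiftRight n 1

-- A's while-loop; `fuel` only makes the recursion structural (each real iteration removes the MSB,
-- so `index.toNat` iterations always suffice on the admitted domain).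
def goA : Nat → Int → Int → List (Int × Int) → List (Int × Int)
  | 0, _, _, output => output
  | fuel + 1, tempindex, previndex, output =>
    if tempindex > 0 then
      let msb := getMSB tempindex
      let target := previndex + msb
      goA fuel (tempindex - msb) target (output ++ [(previndex, target)])
    else output

def getDiffsToTraverse (index : Int) : List (Int × Int) :=
  goA index.toNat index 0 []

-- ===== PORT B =====
-- Source B recurses on index // 2 (here: the Nat quotient of the positive index), doubles both
-- endpoints of every segment of the half, and appends (index-1, index) when index is odd.
def altGo (m : Nat) : List (Int × Int) :=
  if h : m = 0 then []
  else
    let out := (altGo (m / 2)).map (fun p => (2 * p.1, 2 * p.2))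
    if m % 2 = 1 then out ++ [((m : Int) - 1, (m : Int))] else out
termination_by m
decreasing_by exact Nat.div_lt_self (Nat.pos_of_ne_zero h) (by omega)

def getDiffsToTraverse_alt (index : Int) : List (Int × Int) :=
  if index ≤ 0 then [] else altGo index.toNat

-- ===== PRECONDITION & SPEC =====
def Spec_getDiffsToTraverse (index : Int) (out : List (Int × Int)) : Prop := out = getDiffsToTraverse_alt index
instance (index : Int) (out : List (Int × Int)) : Decidable (Spec_getDiffsToTraverse index out) := by unfold Spec_getDiffsToTraverse; infer_instance

-- ===== CLAIM (what is proved, stated in full; the proofs are below) =====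
def Claim_equal_getDiffsToTraverse : Prop := ∀ (index : Int), Dom_getDiffsToTraverse index → Spec_getDiffsToTraverse index (getDiffsToTraverse index)

-- ===== LEMMAS AND PROOFS =====

-- Nat mirror of getMSB's smear.
def smearN (n : Nat) : Nat :=
  let n := n ||| (n >>> 1)
  let n := n ||| (n >>> 2)
  let n := n ||| (n >>> 4)
  let n := n ||| (n >>> 8)
  n ||| (n >>> 16)

lemma getMSB_natCast (t : Nat) : getMSB (t : Int) = ((smearN t + 1) >>> 1 : Nat) := by
  rfl

-- "bits of a are bits of t looked up at offsets ≤ k"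
def Spread (t a k : Nat) : Prop :=
  ∀ i, a.testBit i = true ↔ ∃ j, i ≤ j ∧ j ≤ i + k ∧ t.testBit j = true

lemma spread_step {t a k : Nat} (s : Nat) (hs : s ≤ k + 1) (h : Spread t a k) :
    Spread t (a ||| (a >>> s)) (k + s) := by
  intro i
  simp only [Nat.testBit_or, Nat.testBit_shiftRight, Bool.or_eq_true]
  constructor
  · rintro (hb | hb)
    · obtain ⟨j, h1, h2, h3⟩ := (h i).mp hb
      exact ⟨j, h1, by omega, h3⟩
    · obtain ⟨j, h1, h2, h3⟩ := (h (s + i)).mp hb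
      exact ⟨j, by omega, by omega, h3⟩
  · rintro ⟨j, h1, h2, h3⟩
    by_cases hj : j ≤ i + k
    · exact Or.inl ((h i).mpr ⟨j, h1, hj, h3⟩)
    · exact Or.inr ((h (s + i)).mpr ⟨j, by omega, by omega, h3⟩)

lemma spread_smearN (t : Nat) : Spread t (smearN t) 31 := by
  have h0 : Spread t t 0 := by
    intro i
    constructor
    · intro hb; exact ⟨i, le_refl _, by omega, hb⟩
    · rintro ⟨j, h1, h2, h3⟩; have : j = i := by omega
      simpa [this] using h3
  have h1 := spread_step 1 (by omega) h0
  have h2 := spread_step 2 (by omega) h1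
  have h4 := spread_step 4 (by omega) h2
  have h8 := spread_step 8 (by omega) h4
  have h16 := spread_step 16 (by omega) h8
  simpa [smearN] using h16

lemma testBit_log2 {t : Nat} (ht : 0 < t) : t.testBit t.log2 = true := by
  have h1 : 2 ^ t.log2 ≤ t := Nat.log2_self_le (by omega)
  have h2 : t < 2 ^ (t.log2 + 1) := Nat.lt_log2_self
  have hp : 0 < 2 ^ t.log2 := Nat.two_pow_pos _
  simp only [Nat.testBit, Nat.shiftRight_eq_div_pow, Nat.one_and_eq_mod_two]
  have ha : 1 ≤ t / 2 ^ t.log2 := (Nat.le_div_iff_mul_le hp).mpr (by omega)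
  have hb : t / 2 ^ t.log2 < 2 := (Nat.div_lt_iff_lt_mul hp).mpr (by rw [Nat.pow_succ] at h2; omega)
  have hd : t / 2 ^ t.log2 = 1 := by omega
  simp [hd]

lemma smearN_eq {t : Nat} (ht : 0 < t) (hbound : t < 2 ^ 32) :
    smearN t = 2 ^ (t.log2 + 1) - 1 := by
  have hL : t.log2 ≤ 31 := by
    have := (Nat.log2_lt (n := t) (by omega)).mpr hbound
    omega
  have hlt : t < 2 ^ (t.log2 + 1) := Nat.lt_log2_self
  apply Nat.eq_of_testBit_eq
  intro i
  rw [Nat.testBit_two_pow_sub_one]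
  by_cases hi : i < t.log2 + 1
  · simp only [hi, decide_true]
    exact (spread_smearN t i).mpr ⟨t.log2, by omega, by omega, testBit_log2 ht⟩
  · simp only [hi, decide_false]
    rw [← Bool.not_eq_true]
    intro hb
    obtain ⟨j, h1, _, h3⟩ := (spread_smearN t i).mp hb
    have : t < 2 ^ j := lt_of_lt_of_le hlt (Nat.pow_le_pow_right (by omega) (by omega))
    rw [Nat.testBit_lt_two_pow this] at h3
    exact absurd h3 (by simp)

-- The core fact about A's helper: on 0 < t < 2^32 it is the highest set bit.
lemma getMSB_eq {t : Nat} (ht : 0 < t) (hbound : t < 2 ^ 32) :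
    getMSB (t : Int) = ((2 ^ t.log2 : Nat) : Int) := by
  rw [getMSB_natCast, smearN_eq ht hbound]
  have hp : 0 < 2 ^ (t.log2 + 1) := Nat.two_pow_pos _
  have : 2 ^ (t.log2 + 1) - 1 + 1 = 2 ^ (t.log2 + 1) := by omega
  rw [this]
  congr 1
  rw [Nat.shiftRight_eq_div_pow, Nat.pow_succ]
  omega

-- altGo's one-step unfolding, valid at 0 as well (both sides are []).
lemma altGo_unfold (x : Nat) :
    altGo x = ((altGo (x / 2)).map (fun p => (2 * p.1, 2 * p.2))) ++
      (if x % 2 = 1 then [((x : Int) - 1, (x : Int))] else []) := by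
  by_cases h : x = 0
  · subst h
    rw [altGo]
    simp
  · rw [altGo]
    simp only [h, dite_false]
    split_ifs with hp <;> simp

lemma altGo_zero : altGo 0 = [] := by
  rw [altGo]
  rfl

-- B's recursion satisfies A's peel-the-MSB split.
lemma altGo_msb : ∀ t : Nat, 0 < t →
    altGo t = (0, ((2 ^ t.log2 : Nat) : Int)) ::
      (altGo (t - 2 ^ t.log2)).map
        (fun p => (((2 ^ t.log2 : Nat) : Int) + p.1, ((2 ^ t.log2 : Nat) : Int) + p.2)) := by
  intro t
  induction t using Nat.strong_induction_on with
  | _ t IH =>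
    intro ht
    by_cases h1 : t = 1
    · subst h1
      have hlog1 : Nat.log2 1 = 0 := by
        have := (Nat.log2_lt (n := 1) (by omega)).mpr (show 1 < 2 ^ 1 by omega)
        omega
      rw [altGo_unfold]
      norm_num [altGo_zero, hlog1]
    · -- t ≥ 2
      have ht2 : 2 ≤ t := by omega
      have hq : 0 < t / 2 := by omega
      have hlog : t.log2 = (t / 2).log2 + 1 := by
        have hA : (t / 2).log2 + 1 ≤ t.log2 := by
          rw [Nat.le_log2 (by omega)]
          have := Nat.log2_self_le (show t / 2 ≠ 0 by omega)
          rw [Nat.pow_succ]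
          omega
        have hB : t.log2 < (t / 2).log2 + 2 := by
          rw [Nat.log2_lt (by omega)]
          have := Nat.lt_log2_self (n := t / 2)
          rw [Nat.pow_succ, Nat.pow_succ] at *
          omega
        omega
      have hm'le : 2 ^ (t / 2).log2 ≤ t / 2 := Nat.log2_self_le (by omega)
      have hmn : 2 ^ t.log2 = 2 * 2 ^ (t / 2).log2 := by rw [hlog, Nat.pow_succ]; ring
      have hmle : 2 ^ t.log2 ≤ t := by
        have := Nat.div_mul_le_self t 2
        omega
      have ihq := IH (t / 2) (by omega) hq
      rw [altGo_unfold, ihq]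
      rw [altGo_unfold (t - 2 ^ t.log2)]
      have hdiv : (t - 2 ^ t.log2) / 2 = t / 2 - 2 ^ (t / 2).log2 := by omega
      have hmod : (t - 2 ^ t.log2) % 2 = t % 2 := by omega
      rw [hdiv, hmod]
      simp only [List.map_cons, List.map_append, List.map_map, List.cons_append]
      have hc1 : ((2 : Int) * 0, (2 : Int) * ((2 ^ (t / 2).log2 : Nat) : Int)) =
          ((0 : Int), ((2 ^ t.log2 : Nat) : Int)) := by
        simp only [Prod.mk.injEq]
        rw [hmn]
        push_cast
        norm_num
      rw [hc1]
      congr 1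
      congr 1
      · apply List.map_congr_left
        intro p _
        simp only [Function.comp, Prod.mk.injEq]
        rw [hmn]
        push_cast
        constructor <;> ring
      · split_ifs with hodd
        · have hcast : ((t - 2 ^ t.log2 : Nat) : Int) = (t : Int) - ((2 ^ t.log2 : Nat) : Int) := by
            omega
          simp only [List.map_cons, List.map_nil, hcast, List.cons.injEq, Prod.mk.injEq]
          refine ⟨⟨by ring, by ring⟩, trivial⟩
        · simp

-- A's loop computes altGo shifted by previndex.
lemma goA_eq : ∀ (t fuel : Nat) (prev : Int) (out : List (Int × Int)),
    t < 2 ^ 32 → t ≤ fuel →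
    goA fuel (t : Int) prev out = out ++ (altGo t).map (fun p => (prev + p.1, prev + p.2)) := by
  intro t
  induction t using Nat.strong_induction_on with
  | _ t IH =>
    intro fuel prev out hbound hfuel
    by_cases ht0 : t = 0
    · subst ht0
      cases fuel <;> simp [goA, altGo]
    · have ht : 0 < t := by omega
      obtain ⟨f, rfl⟩ : ∃ f, fuel = f + 1 := ⟨fuel - 1, by omega⟩
      have htpos : ((t : Int) > 0) := by exact_mod_cast ht
      have hmsb := getMSB_eq ht hbound
      have hmle : 2 ^ t.log2 ≤ t := Nat.log2_self_le ht0
      have hmpos : 0 < 2 ^ t.log2 := Nat.two_pow_pos _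
      simp only [goA, if_pos htpos, hmsb]
      have hcast : (t : Int) - ((2 ^ t.log2 : Nat) : Int) = ((t - 2 ^ t.log2 : Nat) : Int) := by
        omega
      rw [hcast,
        IH (t - 2 ^ t.log2) (by omega) f (prev + ((2 ^ t.log2 : Nat) : Int))
          (out ++ [(prev, prev + ((2 ^ t.log2 : Nat) : Int))]) (by omega) (by omega)]
      rw [altGo_msb t ht]
      simp only [List.map_cons, List.map_map, List.append_assoc, List.cons_append,
        List.nil_append, add_zero]
      congr 2
      apply List.map_congr_left
      intro p _
      simp only [Function.comp, Prod.mk.injEq]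
      constructor <;> ring

-- ===== VERDICT (by name: the statement is the Claim_ definition above) =====
theorem getDiffsToTraverse_spec : Claim_equal_getDiffsToTraverse := by
  intro index hdom
  unfold Spec_getDiffsToTraverse getDiffsToTraverse getDiffsToTraverse_alt
  by_cases hle : index ≤ 0
  · have h0 : index.toNat = 0 := by omega
    simp [hle, h0, goA]
  · have hpos : 0 < index := by omega
    have hbound : index ≤ 2 ^ 31 := by
      have : pvDomInt index = true := hdom
      simp [pvDomInt] at this
      omega
    have hcast : ((index.toNat : Nat) : Int) = index := by omega
    rw [if_neg hle]
    have h := goA_eq index.toNat index.toNat 0 [] (by omega) (le_refl _)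
    rw [hcast] at h
    simpa using h
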